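-- pv_equiv track=rewrite | github.com/MrBrantCode/unitest_baseline | mut_generate/mist_train_cf/cf_80750/solution.py | sort_into_subgroups
-- ===== SOURCE A (Python) =====
-- def sort_into_subgroups(numbers):
--     divisible_by_2 = []
--     divisible_by_3 = []
--     not_divisible = []
--
--     for num in numbers:
--         if num % 2 == 0:
--             divisible_by_2.append(num)
--         elif num % 3 == 0:
--             divisible_by_3.append(num)
--         else:
--             not_divisible.append(num)
--
--     return [divisible_by_2, divisible_by_3, not_divisible]
-- ===== SOURCE B (Python) =====
-- def sort_into_subgroups(numbers):
--     return [[n for n in numbers if n % 2 == 0],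
--             [n for n in numbers if n % 2 != 0 and n % 3 == 0],
--             [n for n in numbers if n % 2 != 0 and n % 3 != 0]]
-- ===== Notes on version B (the rewrite author's own statement) =====
-- stated objective: idiomatic
-- what changed: Replaced the single branching accumulator loop with three independent list comprehensions over the input, one per disjoint predicate.
import Mathlib
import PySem

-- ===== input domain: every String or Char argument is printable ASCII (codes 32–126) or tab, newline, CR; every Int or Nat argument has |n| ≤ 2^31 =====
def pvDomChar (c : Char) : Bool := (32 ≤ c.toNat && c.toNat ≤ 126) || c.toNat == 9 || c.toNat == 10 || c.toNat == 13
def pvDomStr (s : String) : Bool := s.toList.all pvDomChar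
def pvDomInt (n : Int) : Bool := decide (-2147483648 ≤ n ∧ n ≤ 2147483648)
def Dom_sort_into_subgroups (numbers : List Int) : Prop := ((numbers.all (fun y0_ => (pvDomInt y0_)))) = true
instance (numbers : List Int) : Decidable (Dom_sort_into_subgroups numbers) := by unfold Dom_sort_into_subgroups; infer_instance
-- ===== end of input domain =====

-- B replaces A's single branching accumulator loop with three independent filters (idiomatic decomposition; same cost).


-- ===== PORT A =====
-- one pass, three accumulators, branch per element (transliteration of A's loop)
def sort_into_subgroups (numbers : List Int) : List (List Int) :=
  let st := numbers.foldl
    (fun (acc : List Int × List Int × List Int) num =>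
      if PySem.Int.mod num 2 = 0 then (acc.1 ++ [num], acc.2.1, acc.2.2)
      else if PySem.Int.mod num 3 = 0 then (acc.1, acc.2.1 ++ [num], acc.2.2)
      else (acc.1, acc.2.1, acc.2.2 ++ [num]))
    ([], [], [])
  [st.1, st.2.1, st.2.2]

-- ===== PORT B =====
-- three independent comprehensions (filters) over the input
def sort_into_subgroups_alt (numbers : List Int) : List (List Int) :=
  [ numbers.filter (fun n => PySem.Int.mod n 2 = 0),
    numbers.filter (fun n => PySem.Int.mod n 2 ≠ 0 ∧ PySem.Int.mod n 3 = 0),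
    numbers.filter (fun n => PySem.Int.mod n 2 ≠ 0 ∧ PySem.Int.mod n 3 ≠ 0) ]

-- ===== PRECONDITION & SPEC =====
def Spec_sort_into_subgroups (numbers : List Int) (out : List (List Int)) : Prop := out = sort_into_subgroups_alt numbers
instance (numbers : List Int) (out : List (List Int)) : Decidable (Spec_sort_into_subgroups numbers out) := by unfold Spec_sort_into_subgroups; infer_instance

-- ===== CLAIM (what is proved, stated in full; the proofs are below) =====
def Claim_equal_sort_into_subgroups : Prop := ∀ (numbers : List Int), Dom_sort_into_subgroups numbers → Spec_sort_into_subgroups numbers (sort_into_subgroups numbers)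

-- ===== LEMMAS AND PROOFS =====

-- loop invariant: the fold starting from partial accumulators appends the three filters
theorem sort_fold_inv (numbers d2 d3 nd : List Int) :
    numbers.foldl
      (fun (acc : List Int × List Int × List Int) num =>
        if PySem.Int.mod num 2 = 0 then (acc.1 ++ [num], acc.2.1, acc.2.2)
        else if PySem.Int.mod num 3 = 0 then (acc.1, acc.2.1 ++ [num], acc.2.2)
        else (acc.1, acc.2.1, acc.2.2 ++ [num]))
      (d2, d3, nd)
    = (d2 ++ numbers.filter (fun n => PySem.Int.mod n 2 = 0),
       d3 ++ numbers.filter (fun n => PySem.Int.mod n 2 ≠ 0 ∧ PySem.Int.mod n 3 = 0),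
       nd ++ numbers.filter (fun n => PySem.Int.mod n 2 ≠ 0 ∧ PySem.Int.mod n 3 ≠ 0)) := by
  simp only [PySem.Int.mod_eq_emod_of_pos (by norm_num : (0:Int) < 2),
             PySem.Int.mod_eq_emod_of_pos (by norm_num : (0:Int) < 3)]
  induction numbers generalizing d2 d3 nd with
  | nil => simp
  | cons x xs ih =>
    by_cases h2 : x % 2 = 0
    · rw [List.foldl_cons, if_pos h2, ih]
      simp [List.filter_cons, h2]
    · by_cases h3 : x % 3 = 0
      · rw [List.foldl_cons, if_neg h2, if_pos h3, ih]
        simp [List.filter_cons]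
        omega
      · rw [List.foldl_cons, if_neg h2, if_neg h3, ih]
        simp [List.filter_cons]
        omega

-- ===== VERDICT (by name: the statement is the Claim_ definition above) =====
theorem sort_into_subgroups_spec : Claim_equal_sort_into_subgroups := by
  intro numbers _
  show sort_into_subgroups numbers = sort_into_subgroups_alt numbers
  unfold sort_into_subgroups sort_into_subgroups_alt
  rw [sort_fold_inv]
  simp
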